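-- pv_equiv track=rewrite | github.com/BTheDragonMaster/covid19 | scripts/find_unique_sequences.py | reverse_fasta_dict
-- ===== SOURCE A (Python) =====
-- def parse_fasta_id(fasta_id):
--     fasta_id = fasta_id.split('|')[0]
--     fasta_id = fasta_id.strip()
--     return fasta_id
--
-- def reverse_fasta_dict(fasta_dict):
--     sequence_to_id = {}
--     for fasta_id, sequence in fasta_dict.items():
--         fasta_id = parse_fasta_id(fasta_id)
--         if not sequence in sequence_to_id:
--             sequence_to_id[sequence] = []
--
--         sequence_to_id[sequence].append(fasta_id)
--
--     return sequence_to_id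
-- ===== SOURCE B (Python) =====
-- def parse_fasta_id(fasta_id):
--     return fasta_id.split('|')[0].strip()
--
-- def reverse_fasta_dict(fasta_dict):
--     items = list(fasta_dict.items())
--     order = list(dict.fromkeys(seq for _, seq in items))
--     return {seq: [parse_fasta_id(fid) for fid, s in items if s == seq]
--             for seq in order}
-- ===== Notes on version B (the rewrite author's own statement) =====
-- stated objective: alternative
-- what changed: Replaces A's single imperative dict-building loop (membership test, conditional empty-list insert, append) with a two-phase plan: dedup the sequences in first-occurrence order, then build the whole dict in one comprehension that scans the items per sequence.
import Mathlib
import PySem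

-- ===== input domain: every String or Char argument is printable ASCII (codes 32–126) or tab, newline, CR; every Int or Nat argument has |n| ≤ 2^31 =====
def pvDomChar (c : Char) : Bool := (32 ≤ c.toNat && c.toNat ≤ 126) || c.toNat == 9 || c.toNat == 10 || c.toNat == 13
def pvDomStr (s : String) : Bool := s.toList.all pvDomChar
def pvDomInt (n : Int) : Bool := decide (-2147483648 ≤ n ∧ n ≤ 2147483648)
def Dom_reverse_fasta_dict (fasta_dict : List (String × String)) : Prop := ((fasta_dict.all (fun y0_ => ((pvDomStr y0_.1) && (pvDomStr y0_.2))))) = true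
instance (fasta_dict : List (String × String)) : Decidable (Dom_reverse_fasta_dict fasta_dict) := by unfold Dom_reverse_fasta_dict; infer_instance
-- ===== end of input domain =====

-- B builds the same grouping by a different plan (sequence order deduped first, then one scan per
-- sequence) instead of A's single dict-mutating loop; same return value, no speed claim.

-- ===== PORT A =====
-- fasta_id.split('|'): the separator is nonempty so split? is some, and the result list is
-- nonempty, so getD []/headD "" are exact here (the defaults are never used).
def parse_fasta_id (fasta_id : String) : String :=
  let fasta_id := ((PySem.Str.split? fasta_id "|").getD []).headD ""
  PySem.Str.strip fasta_id

def reverse_fasta_dict (fasta_dict : List (String × String)) : List (String × List String) :=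
  (fasta_dict.foldl
    (fun sequence_to_id p =>
      let fasta_id := parse_fasta_id p.1
      let sequence_to_id :=
        if sequence_to_id.contains p.2 then sequence_to_id
        else sequence_to_id.insert p.2 []
      sequence_to_id.modify p.2 [] (fun l => l ++ [fasta_id]))
    PySem.Dict.empty).items

-- ===== PORT B =====
def parse_fasta_id_b (fasta_id : String) : String :=
  PySem.Str.strip (((PySem.Str.split? fasta_id "|").getD []).headD "")

def reverse_fasta_dict_alt (fasta_dict : List (String × String)) : List (String × List String) :=
  let order := PySem.List.dedup (fasta_dict.map (fun p => p.2))
  order.map (fun seq =>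
    (seq, (fasta_dict.filter (fun p => p.2 == seq)).map (fun p => parse_fasta_id_b p.1)))

-- ===== PRECONDITION & SPEC =====
def Spec_reverse_fasta_dict (fasta_dict : List (String × String)) (out : List (String × List String)) : Prop := out = reverse_fasta_dict_alt fasta_dict
instance (fasta_dict : List (String × String)) (out : List (String × List String)) : Decidable (Spec_reverse_fasta_dict fasta_dict out) := by unfold Spec_reverse_fasta_dict; infer_instance

-- ===== CLAIM (what is proved, stated in full; the proofs are below) =====
def Claim_equal_reverse_fasta_dict : Prop := ∀ (fasta_dict : List (String × String)), Dom_reverse_fasta_dict fasta_dict → Spec_reverse_fasta_dict fasta_dict (reverse_fasta_dict fasta_dict)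

-- ===== LEMMAS AND PROOFS =====

-- A's "if absent insert [] then append" step is exactly one Dict.modify with default [].
lemma stepA_eq_modify (d : PySem.Dict String (List String)) (k : String) (v : String) :
    (if d.contains k then d else d.insert k []).modify k [] (fun l => l ++ [v])
      = d.modify k [] (fun l => l ++ [v]) := by
  by_cases h : d.contains k = true
  · simp [h]
  · simp only [Bool.not_eq_true] at h
    simp [h, PySem.Dict.modify, PySem.Dict.insert_insert_self,
      PySem.Dict.getD_insert_self, PySem.Dict.getD_of_not_contains d [] h]

lemma portA_eq_std (fasta_dict : List (String × String)) :
    reverse_fasta_dict fasta_dict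
      = ((fasta_dict.map (fun p => (p.2, parse_fasta_id p.1))).foldl
          (fun d q => d.modify q.1 [] (fun l => l ++ [q.2])) PySem.Dict.empty).items := by
  unfold reverse_fasta_dict
  rw [List.foldl_map]
  congr 1
  apply PySem.List.foldl_congr_mem
  intro d p _
  exact stepA_eq_modify d p.2 (parse_fasta_id p.1)

-- ===== VERDICT (by name: the statement is the Claim_ definition above) =====
theorem reverse_fasta_dict_spec : Claim_equal_reverse_fasta_dict := by
  intro fd _
  show reverse_fasta_dict fd = reverse_fasta_dict_alt fd
  rw [portA_eq_std]
  have hnd := PySem.Dict.nodup_keys_foldl_modify_key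
    (fd.map (fun p => (p.2, parse_fasta_id p.1))) Prod.fst []
    (fun _ q v => v ++ [q.2]) PySem.Dict.empty (by simp [PySem.Dict.keys_empty])
  rw [PySem.Dict.items_eq_map_keys _ hnd []]
  rw [PySem.Dict.keys_foldl_modify_key]
  unfold reverse_fasta_dict_alt
  simp only [PySem.Dict.keys_empty, PySem.Set.update_nil_left, List.map_map,
    PySem.List.dedup_eq_ofList, Function.comp_def]
  apply List.map_congr_left
  intro k _
  rw [PySem.Dict.getD_foldl_modify_append]
  simp [PySem.Dict.getD_empty, List.filter_map, Function.comp_def,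
    parse_fasta_id_b, parse_fasta_id]
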